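-- pv_equiv track=rewrite | github.com/pp-mo/ue14500_code | ue14500_sim.py | disp_7seg
-- ===== SOURCE A (Python) =====
-- def disp_7seg(outputs):
--     # Turn an output array into a string 'displaying' 7-segments
--     bit_outputs = [
--         '#' if bit else '_'
--         for bit in outputs
--     ]
--     lines = """
--        00
--      5    1
--      5    1
--        66
--      4    2
--      4    2
--        33
--     """
--     for i_bit in range(7):
--         lines = lines.replace(f'{i_bit}', bit_outputs[i_bit])
--     return lines
-- ===== SOURCE B (Python) =====
-- def disp_7seg(outputs):
--     # Turn an output array into a string 'displaying' 7-segments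
--     table = {str(i): '#' if outputs[i] else '_' for i in range(7)}
--     lines = """
--        00
--      5    1
--      5    1
--        66
--      4    2
--      4    2
--        33
--     """
--     return ''.join(table.get(c, c) for c in lines)
-- ===== Notes on version B (the rewrite author's own statement) =====
-- stated objective: idiomatic
-- what changed: A maps the whole outputs list to bit strings and rewrites the entire template seven times with str.replace; B builds a 7-entry digit-to-segment-char table once (reading only outputs[0..6]) and renders the template in a single per-character pass.
import Mathlib
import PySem

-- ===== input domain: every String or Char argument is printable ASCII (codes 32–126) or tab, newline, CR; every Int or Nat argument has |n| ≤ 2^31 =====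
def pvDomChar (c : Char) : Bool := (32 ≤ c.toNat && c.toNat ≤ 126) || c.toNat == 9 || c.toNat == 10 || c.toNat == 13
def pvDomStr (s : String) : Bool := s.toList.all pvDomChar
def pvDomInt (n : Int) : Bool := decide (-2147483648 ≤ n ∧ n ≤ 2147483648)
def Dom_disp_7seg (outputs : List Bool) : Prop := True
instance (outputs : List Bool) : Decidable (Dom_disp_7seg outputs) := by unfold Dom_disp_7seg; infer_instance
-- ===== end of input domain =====

-- B replaces A's seven whole-template .replace passes by a digit→segment-char table and one per-character pass over the template (idiomatic).

-- ===== PORT A =====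
def disp_7seg (outputs : List Bool) : String :=
  let bit_outputs : List String := outputs.map (fun bit => if bit then "#" else "_")
  let lines : String := "\n       00\n     5    1\n     5    1\n       66\n     4    2\n     4    2\n       33\n    "
  (PySem.List.pyRange 0 7 1).foldl
    (fun lines i_bit =>
      PySem.Str.replace lines (PySem.Int.toStr i_bit) ((PySem.List.pyGet? bit_outputs i_bit).getD "_"))
    lines

-- ===== PORT B =====
-- str(i) for 0 ≤ i ≤ 6 is the single digit character of code 48 + i (exact on this range).
def disp_7seg_alt (outputs : List Bool) : String :=
  let table : PySem.Dict Char Char :=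
    (PySem.List.pyRange 0 7 1).foldl
      (fun d i => d.insert (Char.ofNat (48 + i.toNat))
                           (if (PySem.List.pyGet? outputs i).getD false then '#' else '_'))
      PySem.Dict.empty
  let lines : String := "\n       00\n     5    1\n     5    1\n       66\n     4    2\n     4    2\n       33\n    "
  String.ofList (lines.toList.map (fun c => table.getD c c))

-- ===== PRECONDITION & SPEC =====
-- Pre_ excludes lists with fewer than 7 elements: there A raises IndexError (bit_outputs[i_bit]), and B raises IndexError too.
def Pre_disp_7seg (outputs : List Bool) : Prop := 7 ≤ outputs.length
instance (outputs : List Bool) : Decidable (Pre_disp_7seg outputs) := by unfold Pre_disp_7seg; infer_instance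
def pvWitness_disp_7seg : List Bool := [true, false, true, true, false, false, true]

def Spec_disp_7seg (outputs : List Bool) (out : String) : Prop := out = disp_7seg_alt outputs
instance (outputs : List Bool) (out : String) : Decidable (Spec_disp_7seg outputs out) := by unfold Spec_disp_7seg; infer_instance

-- ===== CLAIM (what is proved, stated in full; the proofs are below) =====
def Claim_equal_disp_7seg : Prop := ∀ (outputs : List Bool), Dom_disp_7seg outputs → Pre_disp_7seg outputs → Spec_disp_7seg outputs (disp_7seg outputs)

-- ===== LEMMAS AND PROOFS =====

lemma disp_7seg_alt_eval (b0 b1 b2 b3 b4 b5 b6 : Bool) (rest : List Bool) :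
    disp_7seg_alt (b0::b1::b2::b3::b4::b5::b6::rest)
      = String.ofList ((("\n       00\n     5    1\n     5    1\n       66\n     4    2\n     4    2\n       33\n    ":String)).toList.map
          (fun c => (PySem.Dict.mk [('0', if b0 then '#' else '_'), ('1', if b1 then '#' else '_'),
            ('2', if b2 then '#' else '_'), ('3', if b3 then '#' else '_'), ('4', if b4 then '#' else '_'),
            ('5', if b5 then '#' else '_'), ('6', if b6 then '#' else '_')]).getD c c)) := by
  simp only [disp_7seg_alt]
  rw [show PySem.List.pyRange 0 7 1 = [0,1,2,3,4,5,6] from by decide]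
  simp only [List.foldl_cons, List.foldl_nil]
  rw [show (0:Int) = ((0:Nat):Int) from rfl, show (1:Int) = ((1:Nat):Int) from rfl,
      show (2:Int) = ((2:Nat):Int) from rfl, show (3:Int) = ((3:Nat):Int) from rfl,
      show (4:Int) = ((4:Nat):Int) from rfl, show (5:Int) = ((5:Nat):Int) from rfl,
      show (6:Int) = ((6:Nat):Int) from rfl]
  simp only [PySem.List.pyGet?_natCast]
  simp [PySem.Dict.insert, PySem.Dict.empty]

lemma go_single (a b : Char) : ∀ (fuel : Nat) (l acc : List Char), l.length ≤ fuel →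
    PySem.Chars.replace.go [a] [b] fuel l acc
      = acc.reverse ++ l.map (fun c => if c = a then b else c) := by
  intro fuel
  induction fuel with
  | zero => intro l acc h; cases l with
    | nil => simp [PySem.Chars.replace.go]
    | cons c t => simp at h
  | succ n ih =>
    intro l acc h
    cases l with
    | nil => simp [PySem.Chars.replace.go]
    | cons c t =>
      rw [PySem.Chars.replace.go]
      by_cases hc : c = a
      · subst hc
        have hp : List.isPrefixOf [c] (c :: t) = true := by simp [List.isPrefixOf]
        simp only [hp, if_pos]
        rw [ih _ _ (by simpa using h)]
        simp
      · have hp : List.isPrefixOf [a] (c :: t) = false := by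
          simp [List.isPrefixOf]
          exact fun h => hc h.symm
        simp only [hp, Bool.false_eq_true, if_neg, not_false_iff]
        rw [ih _ _ (by simpa using h)]
        simp [hc]

lemma replace_single (a b : Char) (s : List Char) :
    PySem.Chars.replace s [a] [b] = s.map (fun c => if c = a then b else c) := by
  rw [PySem.Chars.replace]
  simp [go_single a b s.length s [] (le_refl _)]

lemma str_replace_single (s old new : String) (a b : Char)
    (ha : old.toList = [a]) (hb : new.toList = [b]) :
    PySem.Str.replace s old new
      = String.ofList (s.toList.map (fun c => if c = a then b else c)) := by
  rw [PySem.Str.replace, ha, hb, replace_single]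

lemma disp_7seg_eval (b0 b1 b2 b3 b4 b5 b6 : Bool) (rest : List Bool) :
    disp_7seg (b0::b1::b2::b3::b4::b5::b6::rest)
      = String.ofList ((("\n       00\n     5    1\n     5    1\n       66\n     4    2\n     4    2\n       33\n    ":String)).toList.map
          (fun c => if c = '0' then (if b0 then '#' else '_') else c) |>.map
          (fun c => if c = '1' then (if b1 then '#' else '_') else c) |>.map
          (fun c => if c = '2' then (if b2 then '#' else '_') else c) |>.map
          (fun c => if c = '3' then (if b3 then '#' else '_') else c) |>.map
          (fun c => if c = '4' then (if b4 then '#' else '_') else c) |>.map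
          (fun c => if c = '5' then (if b5 then '#' else '_') else c) |>.map
          (fun c => if c = '6' then (if b6 then '#' else '_') else c)) := by
  simp only [disp_7seg]
  rw [show PySem.List.pyRange 0 7 1 = [0,1,2,3,4,5,6] from by decide]
  simp only [List.foldl_cons, List.foldl_nil, List.map_cons]
  rw [show (0:Int) = ((0:Nat):Int) from rfl, show (1:Int) = ((1:Nat):Int) from rfl,
      show (2:Int) = ((2:Nat):Int) from rfl, show (3:Int) = ((3:Nat):Int) from rfl,
      show (4:Int) = ((4:Nat):Int) from rfl, show (5:Int) = ((5:Nat):Int) from rfl,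
      show (6:Int) = ((6:Nat):Int) from rfl]
  simp only [PySem.List.pyGet?_natCast]
  simp only [List.getElem?_cons_zero, List.getElem?_cons_succ, Option.getD_some]
  rw [str_replace_single _ _ _ '6' (if b6 then '#' else '_') (by decide) (by cases b6 <;> rfl)]
  rw [str_replace_single _ _ _ '5' (if b5 then '#' else '_') (by decide) (by cases b5 <;> rfl)]
  rw [str_replace_single _ _ _ '4' (if b4 then '#' else '_') (by decide) (by cases b4 <;> rfl)]
  rw [str_replace_single _ _ _ '3' (if b3 then '#' else '_') (by decide) (by cases b3 <;> rfl)]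
  rw [str_replace_single _ _ _ '2' (if b2 then '#' else '_') (by decide) (by cases b2 <;> rfl)]
  rw [str_replace_single _ _ _ '1' (if b1 then '#' else '_') (by decide) (by cases b1 <;> rfl)]
  rw [str_replace_single _ _ _ '0' (if b0 then '#' else '_') (by decide) (by cases b0 <;> rfl)]
  simp

lemma char_step (b0 b1 b2 b3 b4 b5 b6 : Bool) (c : Char) :
    (fun c => if c = '6' then (if b6 then '#' else '_') else c)
      ((fun c => if c = '5' then (if b5 then '#' else '_') else c)
      ((fun c => if c = '4' then (if b4 then '#' else '_') else c)
      ((fun c => if c = '3' then (if b3 then '#' else '_') else c)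
      ((fun c => if c = '2' then (if b2 then '#' else '_') else c)
      ((fun c => if c = '1' then (if b1 then '#' else '_') else c)
      ((fun c => if c = '0' then (if b0 then '#' else '_') else c) c))))))
    = (PySem.Dict.mk [('0', if b0 then '#' else '_'), ('1', if b1 then '#' else '_'),
        ('2', if b2 then '#' else '_'), ('3', if b3 then '#' else '_'), ('4', if b4 then '#' else '_'),
        ('5', if b5 then '#' else '_'), ('6', if b6 then '#' else '_')]).getD c c := by
  by_cases h0 : c = '0'
  · subst h0; cases b0 <;> simp [PySem.Dict.getD, PySem.Dict.get?_mk_cons]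
  by_cases h1 : c = '1'
  · subst h1; cases b1 <;> simp [PySem.Dict.getD, PySem.Dict.get?_mk_cons]
  by_cases h2 : c = '2'
  · subst h2; cases b2 <;> simp [PySem.Dict.getD, PySem.Dict.get?_mk_cons]
  by_cases h3 : c = '3'
  · subst h3; cases b3 <;> simp [PySem.Dict.getD, PySem.Dict.get?_mk_cons]
  by_cases h4 : c = '4'
  · subst h4; cases b4 <;> simp [PySem.Dict.getD, PySem.Dict.get?_mk_cons]
  by_cases h5 : c = '5'
  · subst h5; cases b5 <;> simp [PySem.Dict.getD, PySem.Dict.get?_mk_cons]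
  by_cases h6 : c = '6'
  · subst h6; cases b6 <;> simp [PySem.Dict.getD, PySem.Dict.get?_mk_cons]
  · simp [PySem.Dict.getD, h0, h1, h2, h3, h4, h5, h6,
      Ne.symm h0, Ne.symm h1, Ne.symm h2, Ne.symm h3, Ne.symm h4, Ne.symm h5, Ne.symm h6,
      PySem.Dict.get?]

lemma maps_eq (b0 b1 b2 b3 b4 b5 b6 : Bool) (L : List Char) :
    ((((((L.map (fun c => if c = '0' then (if b0 then '#' else '_') else c)).map
      (fun c => if c = '1' then (if b1 then '#' else '_') else c)).map
      (fun c => if c = '2' then (if b2 then '#' else '_') else c)).map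
      (fun c => if c = '3' then (if b3 then '#' else '_') else c)).map
      (fun c => if c = '4' then (if b4 then '#' else '_') else c)).map
      (fun c => if c = '5' then (if b5 then '#' else '_') else c)).map
      (fun c => if c = '6' then (if b6 then '#' else '_') else c)
    = L.map (fun c => (PySem.Dict.mk [('0', if b0 then '#' else '_'), ('1', if b1 then '#' else '_'),
        ('2', if b2 then '#' else '_'), ('3', if b3 then '#' else '_'), ('4', if b4 then '#' else '_'),
        ('5', if b5 then '#' else '_'), ('6', if b6 then '#' else '_')]).getD c c) := by
  induction L with
  | nil => simp
  | cons c t ih =>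
    simp only [List.map_cons]
    rw [ih]
    exact congrArg₂ List.cons (char_step b0 b1 b2 b3 b4 b5 b6 c) rfl

lemma seven_eq (b0 b1 b2 b3 b4 b5 b6 : Bool) (rest : List Bool) :
    disp_7seg (b0::b1::b2::b3::b4::b5::b6::rest) = disp_7seg_alt (b0::b1::b2::b3::b4::b5::b6::rest) := by
  rw [disp_7seg_eval, disp_7seg_alt_eval, maps_eq]

-- ===== VERDICT (by name: the statement is the Claim_ definition above) =====
theorem disp_7seg_spec : Claim_equal_disp_7seg := by
  intro outputs _ hpre
  unfold Spec_disp_7seg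
  match outputs, hpre with
  | b0 :: b1 :: b2 :: b3 :: b4 :: b5 :: b6 :: rest, _ => exact seven_eq b0 b1 b2 b3 b4 b5 b6 rest
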